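-- pv_equiv track=rewrite | github.com/bjih1999/algorithm | re_and_again/BFS/programmers/level2/무인도 여행/main.py | solution
-- ===== SOURCE A (Python) =====
-- from collections import deque
--
-- moves = [(-1, 0), (1, 0), (0, -1), (0, 1)]
--
-- def solution(maps):
--     answer = []
--     board = []
--     for m in maps:
--         board.append(list(m))
--     n = len(board)
--     m = len(board[0])
--
--     visited = [[False] * m for _ in range(n)]
--
--     for i in range(n):
--         for j in range(m):
--             if not visited[i][j] and board[i][j] != 'X':
--                 count = int(board[i][j])
--                 queue = deque()
--                 queue.append((i, j))
--                 visited[i][j] = True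
--                 while queue:
--                     x, y = queue.popleft()
--                     for move in moves:
--                         nx, ny = x + move[0], y + move[1]
--
--                         if 0 <= nx < n and 0 <= ny < m and not visited[nx][ny] and board[nx][ny] != 'X':
--                             visited[nx][ny] = True
--                             count += int(board[nx][ny])
--                             queue.append((nx, ny))
--                 answer.append(count)
--     answer = sorted(answer)
--     if not answer:
--         return [-1]
--     return answer
-- ===== SOURCE B (Python) =====
-- def solution(maps):
--     n, m = len(maps), len(maps[0])
--     parent = list(range(n * m))
--
--     def find(a):
--         while parent[a] != a:
--             a = parent[a]
--         return a
--
--     def union(a, b):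
--         ra, rb = find(a), find(b)
--         if ra != rb:
--             if ra < rb:
--                 parent[rb] = ra
--             else:
--                 parent[ra] = rb
--
--     for idx in range(n * m):
--         i, j = divmod(idx, m)
--         if maps[i][j] != 'X':
--             if i + 1 < n and maps[i + 1][j] != 'X':
--                 union(idx, idx + m)
--             if j + 1 < m and maps[i][j + 1] != 'X':
--                 union(idx, idx + 1)
--
--     sums = {}
--     for idx in range(n * m):
--         i, j = divmod(idx, m)
--         if maps[i][j] != 'X':
--             r = find(idx)
--             sums[r] = sums.get(r, 0) + int(maps[i][j])
--
--     answer = sorted(sums.values())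
--     return answer if answer else [-1]
-- ===== Notes on version B (the rewrite author's own statement) =====
-- stated objective: alternative
-- what changed: Replaces A's per-region BFS flood fill (collections.deque + boolean visited matrix, one traversal per island) with a disjoint-set union-find over flattened cell indices: one pass unions each land cell with its right and down land neighbours (attaching the larger root under the smaller), a second pass accumulates each land cell's digit into a dict keyed by its root, and the dict's values are sorted.
-- outside the precondition, e.g. on solution([]): A raises IndexError, B raises IndexError; on solution(['1A']): A raises ValueError, B raises ValueError; on solution(['12', '3']): A raises IndexError, B raises IndexError
import Mathlib
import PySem

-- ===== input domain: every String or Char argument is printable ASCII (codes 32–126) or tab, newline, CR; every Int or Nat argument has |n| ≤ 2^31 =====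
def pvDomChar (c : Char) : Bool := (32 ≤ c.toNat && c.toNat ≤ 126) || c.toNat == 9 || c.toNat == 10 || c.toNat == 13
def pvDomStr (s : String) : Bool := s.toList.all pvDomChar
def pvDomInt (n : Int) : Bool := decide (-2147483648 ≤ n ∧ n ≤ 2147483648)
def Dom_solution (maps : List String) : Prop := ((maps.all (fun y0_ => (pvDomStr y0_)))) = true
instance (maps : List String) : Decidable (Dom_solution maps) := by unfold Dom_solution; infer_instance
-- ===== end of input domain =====

-- B replaces A's per-region BFS flood fill (deque + boolean visited matrix) by a union-find over
-- flattened cell indices (union right/down land neighbours, then sum digits per root into a dict);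
-- alternative algorithm, no speed claim.

-- ===== PORT A =====
-- Python's int(c) for one grid character (Pre_ guarantees c is a digit)
def pvVal (c : Char) : Int := (PySem.Int.ofStr? (String.ofList [c])).getD 0

def pvCell (board : List (List Char)) (i j : Nat) : Char := (board.getD i []).getD j 'X'

def pvGetV (v : List (List Bool)) (i j : Nat) : Bool := (v.getD i []).getD j false

def pvSetV (v : List (List Bool)) (i j : Nat) : List (List Bool) := v.set i ((v.getD i []).set j true)

def pvMoves : List (Int × Int) := [(-1, 0), (1, 0), (0, -1), (0, 1)]

def bfsStep (board : List (List Char)) (n m : Nat) (x y : Nat)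
    (st : List (Nat × Nat) × List (List Bool) × Int) (mv : Int × Int) :
    List (Nat × Nat) × List (List Bool) × Int :=
  let nx : Int := (x : Int) + mv.1
  let ny : Int := (y : Int) + mv.2
  if 0 ≤ nx ∧ nx < (n : Int) ∧ 0 ≤ ny ∧ ny < (m : Int) ∧
      pvGetV st.2.1 nx.toNat ny.toNat = false ∧ pvCell board nx.toNat ny.toNat ≠ 'X' then
    (st.1 ++ [(nx.toNat, ny.toNat)], pvSetV st.2.1 nx.toNat ny.toNat,
     st.2.2 + pvVal (pvCell board nx.toNat ny.toNat))
  else st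

-- the `while queue:` loop; fuel-bounded (fuel 5*n*m+1 is proven sufficient below)
def bfsLoop (board : List (List Char)) (n m : Nat) :
    Nat → List (Nat × Nat) → List (List Bool) → Int → List (List Bool) × Int
  | 0, _, visited, count => (visited, count)
  | fuel + 1, queue, visited, count =>
    match queue with
    | [] => (visited, count)
    | (x, y) :: rest =>
      let st := pvMoves.foldl (bfsStep board n m x y) (rest, visited, count)
      bfsLoop board n m fuel st.1 st.2.1 st.2.2

def solution (maps : List String) : List Int :=
  let board := maps.foldl (fun b s => b ++ [s.toList]) []
  let n := board.length
  let m := (board.headD []).length   -- board[0]: maps = [] raises IndexError in Python (outside Pre_)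
  let init := ((List.range n).map (fun _ => List.replicate m false), ([] : List Int))
  let fin := (List.range n).foldl (fun st i =>
    (List.range m).foldl (fun st j =>
      if pvGetV st.1 i j = false ∧ pvCell board i j ≠ 'X' then
        let r := bfsLoop board n m (5 * n * m + 1) [(i, j)] (pvSetV st.1 i j) (pvVal (pvCell board i j))
        (r.1, st.2 ++ [r.2])
      else st) st) init
  let answer := PySem.List.sorted fin.2 (fun x : Int => x) false
  if answer = [] then [-1] else answer

-- ===== PORT B =====
def pvChar (maps : List String) (i j : Nat) : Char := ((maps.getD i "").toList).getD j 'X'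

-- the `while parent[a] != a:` loop of find; fuel a+1 is proven sufficient below
def ufFind (parent : List Nat) : Nat → Nat → Nat
  | 0, a => a
  | fuel + 1, a => if parent.getD a a ≠ a then ufFind parent fuel (parent.getD a a) else a

def ufUnion (parent : List Nat) (a b : Nat) : List Nat :=
  let ra := ufFind parent (a + 1) a
  let rb := ufFind parent (b + 1) b
  if ra ≠ rb then (if ra < rb then parent.set rb ra else parent.set ra rb) else parent

def solution_alt (maps : List String) : List Int :=
  let n := maps.length
  let m := ((maps.headD "").toList).length   -- len(maps[0]): maps = [] raises IndexError in Python (outside Pre_)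
  let parent := (List.range (n * m)).foldl (fun p idx =>
    if pvChar maps (idx / m) (idx % m) ≠ 'X' then
      let p1 := if idx / m + 1 < n ∧ pvChar maps (idx / m + 1) (idx % m) ≠ 'X' then
        ufUnion p idx (idx + m) else p
      if idx % m + 1 < m ∧ pvChar maps (idx / m) (idx % m + 1) ≠ 'X' then
        ufUnion p1 idx (idx + 1) else p1
    else p) (List.range (n * m))
  let sums := (List.range (n * m)).foldl (fun (d : PySem.Dict Nat Int) idx =>
    if pvChar maps (idx / m) (idx % m) ≠ 'X' then
      let r := ufFind parent (idx + 1) idx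
      d.insert r (d.getD r 0 + pvVal (pvChar maps (idx / m) (idx % m)))
    else d) PySem.Dict.empty
  let answer := PySem.List.sorted sums.values (fun x : Int => x) false
  if answer = [] then [-1] else answer

-- ===== PRECONDITION & SPEC =====
-- Pre_ excludes exactly the inputs where Python A raises: the empty list (IndexError on maps[0]),
-- a row shorter than the first row (IndexError), and a land cell that is not a single digit (ValueError in int()).
def Pre_solution (maps : List String) : Prop :=
  maps ≠ [] ∧ ∀ s ∈ maps, (maps.headD "").toList.length ≤ s.toList.length ∧
    ∀ j < (maps.headD "").toList.length,
      s.toList.getD j 'X' = 'X' ∨ ('0' ≤ s.toList.getD j 'X' ∧ s.toList.getD j 'X' ≤ '9')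
instance (maps : List String) : Decidable (Pre_solution maps) := by unfold Pre_solution; infer_instance
def pvWitness_solution : List String := ["X591X", "X1X5X", "X500X"]

def Spec_solution (maps : List String) (out : List Int) : Prop := out = solution_alt maps
instance (maps : List String) (out : List Int) : Decidable (Spec_solution maps out) := by unfold Spec_solution; infer_instance

-- ===== CLAIM (what is proved, stated in full; the proofs are below) =====
def Claim_equal_solution : Prop := ∀ (maps : List String), Dom_solution maps → Pre_solution maps → Spec_solution maps (solution maps)

-- ===== LEMMAS AND PROOFS =====

-- ---------- grid abstractions ----------
def pvAdj (c d : Nat × Nat) : Prop :=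
  (c.1 = d.1 ∧ (c.2 = d.2 + 1 ∨ d.2 = c.2 + 1)) ∨ (c.2 = d.2 ∧ (c.1 = d.1 + 1 ∨ d.1 = c.1 + 1))

inductive pvReach (P : Nat × Nat → Prop) (s : Nat × Nat) : Nat × Nat → Prop
  | refl : pvReach P s s
  | step {c d : Nat × Nat} : pvReach P s c → pvAdj c d → P d → pvReach P s d

def pvShape (n m : Nat) (v : List (List Bool)) : Prop :=
  v.length = n ∧ ∀ i, i < n → (v.getD i []).length = m

def pvPF (n m : Nat) (P : Nat × Nat → Prop) [DecidablePred P] : Finset (Nat × Nat) :=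
  (Finset.range n ×ˢ Finset.range m).filter P

def pvRegion (P : Nat × Nat → Prop) (s : Nat × Nat) (M : Finset (Nat × Nat)) : Prop :=
  s ∈ M ∧ (∀ c ∈ M, pvReach P s c) ∧ (∀ c ∈ M, ∀ d, pvAdj c d → P d → d ∈ M)

-- ---------- reachability / region ----------
theorem pvReach_P {P : Nat × Nat → Prop} {s c : Nat × Nat} (h : pvReach P s c) (hs : P s) : P c := by
  induction h with
  | refl => exact hs
  | step _ _ hPd _ => exact hPd

theorem pvRegion_mem {P : Nat × Nat → Prop} {s : Nat × Nat} {M : Finset (Nat × Nat)}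
    (h : pvRegion P s M) {c : Nat × Nat} (hr : pvReach P s c) : c ∈ M := by
  induction hr with
  | refl => exact h.1
  | step _ hadj hPd ih => exact h.2.2 _ ih _ hadj hPd

theorem pvRegion_unique {P : Nat × Nat → Prop} {s : Nat × Nat} {M₁ M₂ : Finset (Nat × Nat)}
    (h₁ : pvRegion P s M₁) (h₂ : pvRegion P s M₂) : M₁ = M₂ :=
  Finset.ext fun c => ⟨fun hc => pvRegion_mem h₂ (h₁.2.1 c hc), fun hc => pvRegion_mem h₁ (h₂.2.1 c hc)⟩

theorem pvReach_mono {P Q : Nat × Nat → Prop} (hPQ : ∀ x, P x → Q x) {s c : Nat × Nat}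
    (h : pvReach P s c) : pvReach Q s c := by
  induction h with
  | refl => exact pvReach.refl
  | step _ hadj hPd ih => exact pvReach.step ih hadj (hPQ _ hPd)

theorem pvAdj_symm {c d : Nat × Nat} (h : pvAdj c d) : pvAdj d c := by
  unfold pvAdj at h ⊢; omega

theorem pvReach_trans {P : Nat × Nat → Prop} {s c d : Nat × Nat}
    (h1 : pvReach P s c) (h2 : pvReach P c d) : pvReach P s d := by
  induction h2 with
  | refl => exact h1
  | step _ hadj hPd ih => exact pvReach.step ih hadj hPd

theorem pvReach_symm {P : Nat × Nat → Prop} {s c : Nat × Nat} (hs : P s)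
    (h : pvReach P s c) : pvReach P c s := by
  induction h with
  | refl => exact pvReach.refl
  | step hsc hadj _ ih =>
    exact pvReach_trans (pvReach.step pvReach.refl (pvAdj_symm hadj) (pvReach_P hsc hs)) ih

-- ---------- moves ↔ adjacency ----------
theorem pvAdj_of_move {mv : Int × Int} (hmv : mv ∈ pvMoves) {x y : Nat} {d : Nat × Nat}
    (h1 : (d.1 : Int) = (x : Int) + mv.1) (h2 : (d.2 : Int) = (y : Int) + mv.2) :
    pvAdj (x, y) d := by
  simp only [pvMoves, List.mem_cons, List.not_mem_nil, or_false] at hmv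
  unfold pvAdj
  rcases hmv with rfl | rfl | rfl | rfl <;> simp at h1 h2 ⊢ <;> omega

theorem pvMove_of_adj {x y : Nat} {d : Nat × Nat} (h : pvAdj (x, y) d) :
    ∃ mv ∈ pvMoves, (d.1 : Int) = (x : Int) + mv.1 ∧ (d.2 : Int) = (y : Int) + mv.2 := by
  unfold pvAdj at h
  simp only at h
  rcases h with ⟨h1, h2 | h2⟩ | ⟨h1, h2 | h2⟩
  · exact ⟨(0, -1), by simp [pvMoves], by omega, by omega⟩
  · exact ⟨(0, 1), by simp [pvMoves], by omega, by omega⟩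
  · exact ⟨(-1, 0), by simp [pvMoves], by omega, by omega⟩
  · exact ⟨(1, 0), by simp [pvMoves], by omega, by omega⟩

-- ---------- visited-matrix lemmas ----------
theorem pvGetV_init (n m a b : Nat) :
    pvGetV ((List.range n).map (fun _ => List.replicate m false)) a b = false := by
  unfold pvGetV
  simp only [List.getD_eq_getElem?_getD]
  rcases Nat.lt_or_ge a n with h | h
  · simp only [List.getElem?_map, List.getElem?_range h, Option.map_some, Option.getD_some,
      List.getElem?_replicate]
    split <;> rfl
  · rw [show ((List.range n).map (fun _ => List.replicate m false))[a]? = none from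
      List.getElem?_eq_none (by simpa)]
    rfl

theorem pvShape_init (n m : Nat) :
    pvShape n m ((List.range n).map (fun _ => List.replicate m false)) := by
  refine ⟨by simp, fun i hi => ?_⟩
  rw [List.getD_eq_getElem?_getD, List.getElem?_map, List.getElem?_range hi]
  simp

theorem pvSetV_shape {n m : Nat} {v : List (List Bool)} (hs : pvShape n m v) (i j : Nat) :
    pvShape n m (pvSetV v i j) := by
  unfold pvSetV
  refine ⟨by simpa using hs.1, fun k hk => ?_⟩
  simp only [List.getD_eq_getElem?_getD, List.getElem?_set]
  by_cases hik : i = k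
  · subst hik
    rw [if_pos rfl, if_pos (hs.1 ▸ hk)]
    simpa [List.getD_eq_getElem?_getD] using hs.2 i hk
  · rw [if_neg hik]
    simpa [List.getD_eq_getElem?_getD] using hs.2 k hk

theorem pvGetV_setV {n m : Nat} {v : List (List Bool)} (hs : pvShape n m v)
    {i j : Nat} (hi : i < n) (hj : j < m) (a b : Nat) :
    (pvGetV (pvSetV v i j) a b = true ↔ ((i, j) = (a, b) ∨ pvGetV v a b = true)) := by
  unfold pvGetV pvSetV
  have hlen : i < v.length := hs.1 ▸ hi
  simp only [List.getD_eq_getElem?_getD, List.getElem?_set]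
  by_cases hia : i = a
  · subst hia
    rw [if_pos rfl, if_pos hlen]
    simp only [Option.getD_some, List.getElem?_set]
    by_cases hjb : j = b
    · subst hjb
      have hjl : j < (v[i]?.getD []).length := by
        have := hs.2 i hi
        rw [List.getD_eq_getElem?_getD] at this
        omega
      rw [if_pos rfl, if_pos hjl]
      simp
    · rw [if_neg hjb]
      simp [Prod.ext_iff, hjb]
  · rw [if_neg hia]
    simp [Prod.ext_iff, hia]

-- ---------- cardinality bookkeeping ----------
theorem pvCard_insert {n m : Nat} {P : Nat × Nat → Prop} [DecidablePred P]
    {M : Finset (Nat × Nat)} {e : Nat × Nat} (he : e ∈ pvPF n m P) (hem : e ∉ M) :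
    (pvPF n m P \ insert e M).card + 1 = (pvPF n m P \ M).card := by
  rw [Finset.sdiff_insert, Finset.card_erase_of_mem (Finset.mem_sdiff.2 ⟨he, hem⟩)]
  have : 0 < (pvPF n m P \ M).card := Finset.card_pos.2 ⟨e, Finset.mem_sdiff.2 ⟨he, hem⟩⟩
  omega

theorem pvMem_PF {n m : Nat} {P : Nat × Nat → Prop} [DecidablePred P] {c : Nat × Nat}
    (h1 : c.1 < n) (h2 : c.2 < m) (hP : P c) : c ∈ pvPF n m P := by
  unfold pvPF
  rw [Finset.mem_filter, Finset.mem_product]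
  exact ⟨⟨Finset.mem_range.2 h1, Finset.mem_range.2 h2⟩, hP⟩

theorem pvCard_le (n m : Nat) (P : Nat × Nat → Prop) [DecidablePred P] (M : Finset (Nat × Nat)) :
    (pvPF n m P \ M).card ≤ n * m := by
  calc (pvPF n m P \ M).card ≤ (pvPF n m P).card := Finset.card_le_card Finset.sdiff_subset
    _ ≤ (Finset.range n ×ˢ Finset.range m).card := Finset.card_filter_le _ _
    _ = n * m := by rw [Finset.card_product, Finset.card_range, Finset.card_range]

-- ---------- A side: the inner `for move in moves` fold ----------
theorem bfsFold_spec (board : List (List Char)) (n m : Nat)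
    (V0 P : Nat × Nat → Prop) [DecidablePred P] (s : Nat × Nat)
    (hP : ∀ c : Nat × Nat, P c ↔ (c.1 < n ∧ c.2 < m ∧ pvCell board c.1 c.2 ≠ 'X' ∧ ¬ V0 c))
    (x y : Nat) :
    ∀ (ms : List (Int × Int)), (∀ mv ∈ ms, mv ∈ pvMoves) →
    ∀ (q : List (Nat × Nat)) (v : List (List Bool)) (cnt : Int) (M : Finset (Nat × Nat)),
      pvShape n m v →
      (∀ c : Nat × Nat, pvGetV v c.1 c.2 = true ↔ (V0 c ∨ c ∈ M)) →
      (∀ c ∈ q, c ∈ M) →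
      (x, y) ∈ M →
      (∀ c ∈ M, pvReach P s c) →
      cnt = M.sum (fun c => pvVal (pvCell board c.1 c.2)) →
      ∃ M' : Finset (Nat × Nat), M ⊆ M' ∧
        (pvShape n m (ms.foldl (bfsStep board n m x y) (q, v, cnt)).2.1 ∧
         (∀ c : Nat × Nat,
            pvGetV (ms.foldl (bfsStep board n m x y) (q, v, cnt)).2.1 c.1 c.2 = true ↔
              (V0 c ∨ c ∈ M')) ∧
         (∀ c ∈ q, c ∈ (ms.foldl (bfsStep board n m x y) (q, v, cnt)).1) ∧
         (∀ c ∈ (ms.foldl (bfsStep board n m x y) (q, v, cnt)).1, c ∈ M') ∧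
         (∀ c ∈ M', c ∈ M ∨ c ∈ (ms.foldl (bfsStep board n m x y) (q, v, cnt)).1) ∧
         (∀ c ∈ M', pvReach P s c) ∧
         (ms.foldl (bfsStep board n m x y) (q, v, cnt)).2.2 =
           M'.sum (fun c => pvVal (pvCell board c.1 c.2)) ∧
         5 * (pvPF n m P \ M').card + (ms.foldl (bfsStep board n m x y) (q, v, cnt)).1.length ≤
           5 * (pvPF n m P \ M).card + q.length ∧
         (∀ mv ∈ ms, ∀ d : Nat × Nat, (d.1 : Int) = (x : Int) + mv.1 →
            (d.2 : Int) = (y : Int) + mv.2 → P d → d ∈ M')) := by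
  intro ms
  induction ms with
  | nil =>
    intro _ q v cnt M hshape hchar hq hx hreach hcnt
    exact ⟨M, Finset.Subset.refl M, hshape, hchar, fun c hc => hc, hq, fun c hc => Or.inl hc,
      hreach, hcnt, le_refl _, by simp⟩
  | cons mv ms ih =>
    intro hms q v cnt M hshape hchar hq hx hreach hcnt
    rw [List.foldl_cons]
    by_cases hcond : (0 ≤ (x : Int) + mv.1 ∧ (x : Int) + mv.1 < (n : Int) ∧
        0 ≤ (y : Int) + mv.2 ∧ (y : Int) + mv.2 < (m : Int) ∧
        pvGetV v ((x : Int) + mv.1).toNat ((y : Int) + mv.2).toNat = false ∧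
        pvCell board ((x : Int) + mv.1).toNat ((y : Int) + mv.2).toNat ≠ 'X')
    · -- the neighbour is pushed and marked
      have hstep : bfsStep board n m x y (q, v, cnt) mv =
          (q ++ [(((x : Int) + mv.1).toNat, ((y : Int) + mv.2).toNat)],
           pvSetV v ((x : Int) + mv.1).toNat ((y : Int) + mv.2).toNat,
           cnt + pvVal (pvCell board ((x : Int) + mv.1).toNat ((y : Int) + mv.2).toNat)) := by
        unfold bfsStep
        rw [if_pos hcond]
      rw [hstep]
      obtain ⟨h0, h1, h2, h3, h4, h5⟩ := hcond
      set e : Nat × Nat := (((x : Int) + mv.1).toNat, ((y : Int) + mv.2).toNat) with he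
      rw [show ((x : Int) + mv.1).toNat = e.1 from rfl, show ((y : Int) + mv.2).toNat = e.2 from rfl]
      have he1 : e.1 < n := by simp [he]; omega
      have he2 : e.2 < m := by simp [he]; omega
      have hnotv : ¬ (V0 e ∨ e ∈ M) := by
        rw [← hchar e]
        simp [he, h4]
      have heM : e ∉ M := fun h => hnotv (Or.inr h)
      have heV0 : ¬ V0 e := fun h => hnotv (Or.inl h)
      have hPe : P e := (hP e).2 ⟨he1, he2, h5, heV0⟩
      have hadj : pvAdj (x, y) e := by
        refine pvAdj_of_move (hms mv (by simp)) ?_ ?_ <;> simp [he] <;> omega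
      have hreachE : pvReach P s e := pvReach.step (hreach _ hx) hadj hPe
      obtain ⟨M', hMM', hsh', hch', hqk, hkM, hMk, hre', hcnt', hcard', hmv'⟩ :=
        ih (fun m hm => hms m (by simp [hm])) (q ++ [e])
          (pvSetV v e.1 e.2) (cnt + pvVal (pvCell board e.1 e.2)) (insert e M)
          (pvSetV_shape hshape e.1 e.2)
          (by
            intro c
            rw [pvGetV_setV hshape he1 he2]
            rw [hchar c]
            simp only [Finset.mem_insert, Prod.mk.injEq]
            constructor
            · rintro (⟨ha, hb⟩ | h | h)
              · exact Or.inr (Or.inl (Prod.ext_iff.2 ⟨ha, hb⟩).symm)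
              · exact Or.inl h
              · exact Or.inr (Or.inr h)
            · rintro (h | h | h)
              · exact Or.inr (Or.inl h)
              · obtain ⟨ha, hb⟩ := Prod.ext_iff.1 h.symm
                exact Or.inl ⟨ha, hb⟩
              · exact Or.inr (Or.inr h))
          (by
            intro c hc
            rcases List.mem_append.1 hc with h | h
            · exact Finset.mem_insert_of_mem (hq c h)
            · simp at h; subst h; exact Finset.mem_insert_self _ _)
          (Finset.mem_insert_of_mem hx)
          (by
            intro c hc
            rcases Finset.mem_insert.1 hc with rfl | h
            · exact hreachE
            · exact hreach c h)
          (by rw [Finset.sum_insert heM, hcnt]; ring)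
      refine ⟨M', Finset.Subset.trans (Finset.subset_insert e M) hMM', hsh', hch', ?_, hkM, ?_, hre',
        hcnt', ?_, ?_⟩
      · intro c hc; exact hqk c (List.mem_append_left _ hc)
      · intro c hc
        rcases hMk c hc with h | h
        · rcases Finset.mem_insert.1 h with he' | h'
          · exact Or.inr (hqk c (List.mem_append_right _ (by simp [he'])))
          · exact Or.inl h'
        · exact Or.inr h
      · have hePF : e ∈ pvPF n m P := pvMem_PF he1 he2 hPe
        have := pvCard_insert hePF heM
        rw [List.length_append] at hcard'
        simp at hcard'
        omega
      · intro mv' hmv'' d hd1 hd2 hPd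
        rcases List.mem_cons.1 hmv'' with rfl | hmem
        · have : d = e := by
            have : d.1 = e.1 ∧ d.2 = e.2 := by constructor <;> simp [he] <;> omega
            exact Prod.ext this.1 this.2
          subst this
          exact hMM' (Finset.mem_insert_self _ _)
        · exact hmv' mv' hmem d hd1 hd2 hPd
    · -- nothing happens for this move
      have hstep : bfsStep board n m x y (q, v, cnt) mv = (q, v, cnt) := by
        unfold bfsStep
        rw [if_neg hcond]
      rw [hstep]
      obtain ⟨M', hMM', hsh', hch', hqk, hkM, hMk, hre', hcnt', hcard', hmv'⟩ :=
        ih (fun m hm => hms m (by simp [hm])) q v cnt M hshape hchar hq hx hreach hcnt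
      refine ⟨M', hMM', hsh', hch', hqk, hkM, hMk, hre', hcnt', hcard', ?_⟩
      intro mv' hmv'' d hd1 hd2 hPd
      rcases List.mem_cons.1 hmv'' with rfl | hmem
      · -- the guard failed, yet the target cell satisfies P: it must already be visited, i.e. in M
        obtain ⟨hdn, hdm, hdc, hdV⟩ := (hP d).1 hPd
        have hx1 : ((x : Int) + mv'.1).toNat = d.1 := by omega
        have hy1 : ((y : Int) + mv'.2).toNat = d.2 := by omega
        have hget : pvGetV v d.1 d.2 = true := by
          by_contra hfalse
          apply hcond
          refine ⟨by omega, by omega, by omega, by omega, ?_, ?_⟩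
          · rw [hx1, hy1]; exact Bool.eq_false_iff.2 hfalse
          · rw [hx1, hy1]; exact hdc
        rcases (hchar d).1 hget with h | h
        · exact absurd h hdV
        · exact hMM' h
      · exact hmv' mv' hmem d hd1 hd2 hPd

-- ---------- A side: the `while queue` loop ----------
theorem bfsLoop_spec (board : List (List Char)) (n m : Nat)
    (V0 P : Nat × Nat → Prop) [DecidablePred P] (s : Nat × Nat)
    (hP : ∀ c : Nat × Nat, P c ↔ (c.1 < n ∧ c.2 < m ∧ pvCell board c.1 c.2 ≠ 'X' ∧ ¬ V0 c)) :
    ∀ (fuel : Nat) (q : List (Nat × Nat)) (v : List (List Bool)) (cnt : Int)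
      (M : Finset (Nat × Nat)),
      pvShape n m v →
      (∀ c : Nat × Nat, pvGetV v c.1 c.2 = true ↔ (V0 c ∨ c ∈ M)) →
      (∀ c ∈ q, c ∈ M) →
      (∀ c ∈ M, pvReach P s c) →
      (∀ c ∈ M, c ∉ q → ∀ d, pvAdj c d → P d → d ∈ M) →
      cnt = M.sum (fun c => pvVal (pvCell board c.1 c.2)) →
      5 * (pvPF n m P \ M).card + q.length ≤ fuel →
      ∃ M' : Finset (Nat × Nat), M ⊆ M' ∧
        pvShape n m (bfsLoop board n m fuel q v cnt).1 ∧
        (∀ c : Nat × Nat, pvGetV (bfsLoop board n m fuel q v cnt).1 c.1 c.2 = true ↔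
          (V0 c ∨ c ∈ M')) ∧
        (bfsLoop board n m fuel q v cnt).2 = M'.sum (fun c => pvVal (pvCell board c.1 c.2)) ∧
        (∀ c ∈ M', pvReach P s c) ∧
        (∀ c ∈ M', ∀ d, pvAdj c d → P d → d ∈ M') := by
  intro fuel
  induction fuel with
  | zero =>
    intro q v cnt M hshape hchar hq hreach hclosed hcnt hfuel
    have hq0 : q = [] := List.length_eq_zero_iff.1 (by omega)
    subst hq0
    exact ⟨M, Finset.Subset.refl M, hshape, hchar, hcnt,
      hreach, fun c hc d hadj hPd => hclosed c hc (by simp) d hadj hPd⟩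
  | succ fuel ih =>
    intro q v cnt M hshape hchar hq hreach hclosed hcnt hfuel
    match q with
    | [] =>
      exact ⟨M, Finset.Subset.refl M, hshape, hchar, hcnt,
        hreach, fun c hc d hadj hPd => hclosed c hc (by simp) d hadj hPd⟩
    | (x, y) :: rest =>
      show ∃ M', _
      rw [show bfsLoop board n m (fuel + 1) ((x, y) :: rest) v cnt =
          bfsLoop board n m fuel
            (pvMoves.foldl (bfsStep board n m x y) (rest, v, cnt)).1
            (pvMoves.foldl (bfsStep board n m x y) (rest, v, cnt)).2.1
            (pvMoves.foldl (bfsStep board n m x y) (rest, v, cnt)).2.2 from rfl]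
      obtain ⟨Mf, hMMf, hshf, hchf, hqk, hkMf, hMfk, href, hcntf, hcardf, hmvf⟩ :=
        bfsFold_spec board n m V0 P s hP x y pvMoves (fun mv h => h) rest v cnt M
          hshape hchar (fun c hc => hq c (List.mem_cons_of_mem _ hc)) (hq (x, y) List.mem_cons_self)
          hreach hcnt
      obtain ⟨M', hMfM', hsh', hch', hcnt', hre', hcl'⟩ :=
        ih (pvMoves.foldl (bfsStep board n m x y) (rest, v, cnt)).1
          (pvMoves.foldl (bfsStep board n m x y) (rest, v, cnt)).2.1
          (pvMoves.foldl (bfsStep board n m x y) (rest, v, cnt)).2.2 Mf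
          hshf hchf hkMf href
          (by
            intro c hc hcq d hadj hPd
            rcases hMfk c hc with hcM | hck
            · by_cases hcxy : c = (x, y)
              · subst hcxy
                obtain ⟨mv, hmv, hd1, hd2⟩ := pvMove_of_adj hadj
                exact hmvf mv hmv d hd1 hd2 hPd
              · refine hMMf (hclosed c hcM ?_ d hadj hPd)
                intro hmem
                rcases List.mem_cons.1 hmem with h | h
                · exact hcxy h
                · exact hcq (hqk c h)
            · exact absurd hck hcq)
          hcntf
          (by simp only [List.length_cons] at hfuel; omega)
      exact ⟨M', Finset.Subset.trans hMMf hMfM', hsh', hch', hcnt', hre', hcl'⟩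

-- ---------- board/maps coupling ----------
theorem pvCell_map (maps : List String) (i j : Nat) :
    pvCell (maps.map String.toList) i j = pvChar maps i j := by
  unfold pvCell pvChar
  simp only [List.getD_eq_getElem?_getD, List.getElem?_map]
  cases maps[i]? <;> simp



-- ---------- flattened index arithmetic ----------
def pvIdx (m : Nat) (c : Nat × Nat) : Nat := c.1 * m + c.2

def pvCellOf (m t : Nat) : Nat × Nat := (t / m, t % m)

theorem pvIdx_cellOf {m : Nat} (_hm : 0 < m) (t : Nat) : pvIdx m (pvCellOf m t) = t := by
  unfold pvIdx pvCellOf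
  simp only
  rw [Nat.mul_comm]
  exact Nat.div_add_mod t m

theorem pvCellOf_idx {m : Nat} {c : Nat × Nat} (hc : c.2 < m) : pvCellOf m (pvIdx m c) = c := by
  unfold pvIdx pvCellOf
  have h1 : (c.1 * m + c.2) / m = c.1 := by
    rw [Nat.mul_comm c.1 m, Nat.mul_add_div (by omega), Nat.div_eq_of_lt hc]
    omega
  have h2 : (c.1 * m + c.2) % m = c.2 := by
    rw [Nat.mul_comm c.1 m, Nat.mul_add_mod]
    exact Nat.mod_eq_of_lt hc
  rw [h1, h2]

theorem pvIdx_lt {n m : Nat} {c : Nat × Nat} (h1 : c.1 < n) (h2 : c.2 < m) :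
    pvIdx m c < n * m := by
  unfold pvIdx
  calc c.1 * m + c.2 < c.1 * m + m := by omega
    _ = (c.1 + 1) * m := by ring
    _ ≤ n * m := Nat.mul_le_mul_right m (by omega)

theorem pvIdx_inj {m : Nat} {c d : Nat × Nat} (hc : c.2 < m) (hd : d.2 < m)
    (h : pvIdx m c = pvIdx m d) : c = d := by
  have := pvCellOf_idx hc
  rw [h, pvCellOf_idx hd] at this
  exact this.symm

theorem pvCellOf_lt {n m t : Nat} (ht : t < n * m) : (pvCellOf m t).1 < n ∧ (pvCellOf m t).2 < m := by
  unfold pvCellOf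
  have hm : 0 < m := by by_contra h; simp [Nat.le_zero.1 (Nat.not_lt.1 h)] at ht
  constructor
  · exact Nat.div_lt_of_lt_mul (Nat.mul_comm n m ▸ ht)
  · exact Nat.mod_lt _ hm

-- ---------- land cells, connectivity, components, seeds ----------
def pvP0 (maps : List String) (n m : Nat) (c : Nat × Nat) : Prop :=
  c.1 < n ∧ c.2 < m ∧ pvChar maps c.1 c.2 ≠ 'X'

def pvConn (maps : List String) (n m : Nat) (c d : Nat × Nat) : Prop :=
  pvReach (pvP0 maps n m) c d

def pvSeed (maps : List String) (n m : Nat) (c : Nat × Nat) : Prop :=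
  pvP0 maps n m c ∧ ∀ d, pvP0 maps n m d → pvConn maps n m c d → pvIdx m c ≤ pvIdx m d

noncomputable def pvComp (maps : List String) (n m : Nat) (c : Nat × Nat) : Finset (Nat × Nat) :=
  @Finset.filter _ (fun d => pvConn maps n m c d) (Classical.decPred _)
    (Finset.range n ×ˢ Finset.range m)

noncomputable def pvPartial (maps : List String) (n m : Nat) (c : Nat × Nat) (K : Nat) : Int :=
  ((pvComp maps n m c).filter (fun e => pvIdx m e < K)).sum (fun e => pvVal (pvChar maps e.1 e.2))

noncomputable def pvSeeds (maps : List String) (n m K : Nat) : List (Nat × Nat) :=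
  (List.range K).filterMap (fun t =>
    @dite _ (pvSeed maps n m (pvCellOf m t)) (Classical.propDecidable _)
      (fun _ => some (pvCellOf m t)) (fun _ => none))

theorem mem_pvComp {maps : List String} {n m : Nat} {c : Nat × Nat}
    (hc : pvP0 maps n m c) (d : Nat × Nat) :
    d ∈ pvComp maps n m c ↔ pvConn maps n m c d := by
  unfold pvComp
  rw [@Finset.mem_filter _ _ (Classical.decPred _), Finset.mem_product, Finset.mem_range,
    Finset.mem_range]
  constructor
  · exact fun h => h.2
  · intro h
    have hd := pvReach_P h hc
    exact ⟨⟨hd.1, hd.2.1⟩, h⟩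

theorem pvRegion_comp {maps : List String} {n m : Nat} {c : Nat × Nat}
    (hc : pvP0 maps n m c) : pvRegion (pvP0 maps n m) c (pvComp maps n m c) := by
  refine ⟨(mem_pvComp hc c).2 pvReach.refl, fun d hd => (mem_pvComp hc d).1 hd, ?_⟩
  intro d hd e hadj he
  exact (mem_pvComp hc e).2 (pvReach.step ((mem_pvComp hc d).1 hd) hadj he)

theorem pvSeed_exists {maps : List String} {n m : Nat} {c : Nat × Nat}
    (hc : pvP0 maps n m c) : ∃ s, pvSeed maps n m s ∧ pvConn maps n m s c := by
  obtain ⟨s, hsmem, hsmin⟩ := Finset.exists_min_image (pvComp maps n m c) (pvIdx m)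
    ⟨c, (mem_pvComp hc c).2 pvReach.refl⟩
  have hconn_cs : pvConn maps n m c s := (mem_pvComp hc s).1 hsmem
  have hs : pvP0 maps n m s := pvReach_P hconn_cs hc
  have hconn_sc : pvConn maps n m s c := pvReach_symm hc hconn_cs
  refine ⟨s, ⟨hs, fun d hd hconn_sd => ?_⟩, hconn_sc⟩
  exact hsmin d ((mem_pvComp hc d).2 (pvReach_trans hconn_cs hconn_sd))

theorem pvSeed_unique {maps : List String} {n m : Nat} {s s' : Nat × Nat}
    (hs : pvSeed maps n m s) (hs' : pvSeed maps n m s') (h : pvConn maps n m s s') : s = s' := by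
  have h1 : pvIdx m s ≤ pvIdx m s' := hs.2 s' hs'.1 h
  have h2 : pvIdx m s' ≤ pvIdx m s := hs'.2 s hs.1 (pvReach_symm hs.1 h)
  exact pvIdx_inj hs.1.2.1 hs'.1.2.1 (by omega)

theorem pvSeeds_succ (maps : List String) (n m K : Nat) :
    pvSeeds maps n m (K + 1) = pvSeeds maps n m K ++
      (@dite _ (pvSeed maps n m (pvCellOf m K)) (Classical.propDecidable _)
        (fun _ => [pvCellOf m K]) (fun _ => [])) := by
  unfold pvSeeds
  rw [List.range_succ, List.filterMap_append]
  congr 1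
  by_cases h : pvSeed maps n m (pvCellOf m K) <;> simp [h]

theorem pvSeeds_succ_pos (maps : List String) (n m K : Nat)
    (h : pvSeed maps n m (pvCellOf m K)) :
    pvSeeds maps n m (K + 1) = pvSeeds maps n m K ++ [pvCellOf m K] := by
  rw [pvSeeds_succ]; congr 1; simp [h]

theorem pvSeeds_succ_neg (maps : List String) (n m K : Nat)
    (h : ¬ pvSeed maps n m (pvCellOf m K)) :
    pvSeeds maps n m (K + 1) = pvSeeds maps n m K := by
  rw [pvSeeds_succ]; simp [h]

theorem mem_pvSeeds {maps : List String} {n m K : Nat} {s : Nat × Nat} :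
    s ∈ pvSeeds maps n m K ↔ ∃ t < K, s = pvCellOf m t ∧ pvSeed maps n m s := by
  unfold pvSeeds
  simp only [List.mem_filterMap, List.mem_range]
  constructor
  · rintro ⟨t, ht, hd⟩
    by_cases h : pvSeed maps n m (pvCellOf m t)
    · rw [dif_pos h] at hd
      exact ⟨t, ht, (Option.some_inj.1 hd).symm, by rwa [(Option.some_inj.1 hd)] at h ⟩
    · rw [dif_neg h] at hd; exact absurd hd (by simp)
  · rintro ⟨t, ht, rfl, hseed⟩
    exact ⟨t, ht, by rw [dif_pos hseed]⟩

theorem mem_pvSeeds_iff {maps : List String} {n m K : Nat} (hm : 0 < m) {s : Nat × Nat} :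
    s ∈ pvSeeds maps n m K ↔ pvSeed maps n m s ∧ pvIdx m s < K := by
  rw [mem_pvSeeds]
  constructor
  · rintro ⟨t, ht, rfl, hseed⟩
    exact ⟨hseed, by rwa [pvIdx_cellOf hm]⟩
  · rintro ⟨hseed, hlt⟩
    exact ⟨pvIdx m s, hlt, (pvCellOf_idx hseed.1.2.1).symm, hseed⟩

theorem pvSeeds_idx_nodup {maps : List String} {n m : Nat} (hm : 0 < m) (K : Nat) :
    ((pvSeeds maps n m K).map (pvIdx m)).Nodup := by
  induction K with
  | zero => simp [pvSeeds]
  | succ K ih =>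
    rw [pvSeeds_succ]
    by_cases h : pvSeed maps n m (pvCellOf m K)
    · rw [dif_pos h, List.map_append, List.map_singleton]
      rw [List.nodup_append]
      refine ⟨ih, List.nodup_singleton _, ?_⟩
      intro a ha
      simp only [List.mem_map] at ha
      obtain ⟨s, hs, rfl⟩ := ha
      have := (mem_pvSeeds_iff hm).1 hs
      rw [pvIdx_cellOf hm]
      simp only [List.mem_singleton]
      omega
    · rw [dif_neg h]; simpa using ih

theorem pvSeeds_idx_lt {maps : List String} {n m : Nat} (hm : 0 < m) {K : Nat} {s : Nat × Nat}
    (hs : s ∈ pvSeeds maps n m K) : pvIdx m s < K := ((mem_pvSeeds_iff hm).1 hs).2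

-- ---------- generic fold helpers ----------
theorem foldl_range_inv {σ : Type} (f : σ → Nat → σ) (Inv : Nat → σ → Prop) (N : Nat) (init : σ)
    (h0 : Inv 0 init) (hstep : ∀ K st, K < N → Inv K st → Inv (K + 1) (f st K)) :
    Inv N ((List.range N).foldl f init) := by
  induction N with
  | zero => simpa using h0
  | succ N ih =>
    rw [List.range_succ, List.foldl_append, List.foldl_cons, List.foldl_nil]
    exact hstep N _ (Nat.lt_succ_self N) (ih (fun K st hK => hstep K st (by omega)))

theorem double_fold_eq {σ : Type} (g : σ → Nat → Nat → σ) (n m : Nat) (init : σ) :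
    (List.range n).foldl (fun st i => (List.range m).foldl (fun st j => g st i j) st) init
      = (List.range (n * m)).foldl (fun st t => g st (t / m) (t % m)) init := by
  rcases Nat.eq_zero_or_pos m with rfl | hm
  · simp
  · induction n generalizing init with
    | zero => simp
    | succ n ih =>
      rw [List.range_succ, List.foldl_append, List.foldl_cons, List.foldl_nil, ih,
        show (n + 1) * m = n * m + m by ring, List.range_add, List.foldl_append, List.foldl_map]
      apply PySem.List.foldl_congr_mem
      intro acc x hx
      have hxm : x < m := List.mem_range.1 hx
      have h1 : (n * m + x) / m = n := by
        rw [Nat.mul_comm n m, Nat.mul_add_div (by omega), Nat.div_eq_of_lt hxm]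
        omega
      have h2 : (n * m + x) % m = x := by
        rw [Nat.mul_comm n m, Nat.mul_add_mod]
        exact Nat.mod_eq_of_lt hxm
      rw [h1, h2]


-- ---------- component sums ----------
theorem pvComp_range {maps : List String} {n m : Nat} {c e : Nat × Nat}
    (he : e ∈ pvComp maps n m c) : e.1 < n ∧ e.2 < m := by
  unfold pvComp at he
  rw [@Finset.mem_filter _ _ (Classical.decPred _), Finset.mem_product, Finset.mem_range,
    Finset.mem_range] at he
  exact he.1

theorem pvPartial_full (maps : List String) (n m : Nat) (c : Nat × Nat) :
    pvPartial maps n m c (n * m) =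
      (pvComp maps n m c).sum (fun e => pvVal (pvChar maps e.1 e.2)) := by
  unfold pvPartial
  congr 1
  apply Finset.filter_true_of_mem
  intro e he
  have := pvComp_range he
  exact pvIdx_lt this.1 this.2

-- the abstract visited set after K scanned cells is a union of components
theorem pvV_conn {maps : List String} {n m K : Nat} {c e : Nat × Nat}
    (hV : ∃ d, pvP0 maps n m d ∧ pvIdx m d < K ∧ pvConn maps n m d c)
    (hconn : pvConn maps n m c e) :
    ∃ d, pvP0 maps n m d ∧ pvIdx m d < K ∧ pvConn maps n m d e := by
  obtain ⟨d, hd, hlt, hdc⟩ := hV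
  exact ⟨d, hd, hlt, pvReach_trans hdc hconn⟩

-- ---------- A's outer loop invariant ----------
def pvInvA (maps : List String) (n m K : Nat) (st : List (List Bool) × List Int) : Prop :=
  pvShape n m st.1 ∧
  (∀ c : Nat × Nat, pvGetV st.1 c.1 c.2 = true ↔
      ∃ d, pvP0 maps n m d ∧ pvIdx m d < K ∧ pvConn maps n m d c) ∧
  st.2 = (pvSeeds maps n m K).map (fun s => pvPartial maps n m s (n * m))

set_option maxHeartbeats 1000000 in
theorem pvInvA_step (maps : List String) (n m K : Nat) (hK : K < n * m)
    (st : List (List Bool) × List Int) (h : pvInvA maps n m K st) :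
    pvInvA maps n m (K + 1)
      (if pvGetV st.1 (K / m) (K % m) = false ∧
          pvCell (maps.map String.toList) (K / m) (K % m) ≠ 'X' then
        ((bfsLoop (maps.map String.toList) n m (5 * n * m + 1) [(K / m, K % m)]
            (pvSetV st.1 (K / m) (K % m))
            (pvVal (pvCell (maps.map String.toList) (K / m) (K % m)))).1,
         st.2 ++ [(bfsLoop (maps.map String.toList) n m (5 * n * m + 1) [(K / m, K % m)]
            (pvSetV st.1 (K / m) (K % m))
            (pvVal (pvCell (maps.map String.toList) (K / m) (K % m)))).2])
      else st) := by
  obtain ⟨hsh, hchar, hans⟩ := h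
  have hm : 0 < m := by
    by_contra hm0
    have : m = 0 := by omega
    subst this
    simp at hK
  have hrange := pvCellOf_lt (n := n) (m := m) hK
  have hi : K / m < n := hrange.1
  have hj : K % m < m := hrange.2
  have hcK : pvCellOf m K = (K / m, K % m) := rfl
  have hidxc : pvIdx m (K / m, K % m) = K := by
    rw [← hcK, pvIdx_cellOf hm]
  have hcc : pvCell (maps.map String.toList) (K / m) (K % m) = pvChar maps (K / m) (K % m) :=
    pvCell_map maps _ _
  by_cases hcond : pvGetV st.1 (K / m) (K % m) = false ∧
      pvCell (maps.map String.toList) (K / m) (K % m) ≠ 'X'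
  · rw [if_pos hcond]
    obtain ⟨hget, hX⟩ := hcond
    have hX' : pvChar maps (K / m) (K % m) ≠ 'X' := hcc ▸ hX
    have hP0c : pvP0 maps n m (K / m, K % m) := ⟨hi, hj, hX'⟩
    have hnotV : ¬ ∃ d, pvP0 maps n m d ∧ pvIdx m d < K ∧ pvConn maps n m d (K / m, K % m) := by
      intro hV
      have := (hchar (K / m, K % m)).2 hV
      rw [hget] at this
      exact Bool.false_ne_true this
    -- the BFS explores exactly the unvisited-land region of the seed, which is its whole component
    have hPiff : ∀ c : Nat × Nat,
        (fun c : Nat × Nat => pvP0 maps n m c ∧ ¬ pvGetV st.1 c.1 c.2 = true) c ↔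
        (c.1 < n ∧ c.2 < m ∧ pvCell (maps.map String.toList) c.1 c.2 ≠ 'X' ∧
          ¬ pvGetV st.1 c.1 c.2 = true) := by
      intro c
      rw [pvCell_map]
      unfold pvP0
      tauto
    have hPc : (fun c : Nat × Nat => pvP0 maps n m c ∧ ¬ pvGetV st.1 c.1 c.2 = true)
        (K / m, K % m) := ⟨hP0c, by rw [hget]; exact Bool.false_ne_true⟩
    haveI : DecidablePred fun c : Nat × Nat => pvP0 maps n m c ∧ ¬ pvGetV st.1 c.1 c.2 = true :=
      fun c => by unfold pvP0; infer_instance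
    obtain ⟨MA, hsubA, hshA, hchA, hcntA, hreA, hclA⟩ :=
      bfsLoop_spec (maps.map String.toList) n m (fun c => pvGetV st.1 c.1 c.2 = true)
        (fun c : Nat × Nat => pvP0 maps n m c ∧ ¬ pvGetV st.1 c.1 c.2 = true) (K / m, K % m)
        hPiff (5 * n * m + 1) [(K / m, K % m)]
        (pvSetV st.1 (K / m) (K % m))
        (pvVal (pvCell (maps.map String.toList) (K / m) (K % m))) {(K / m, K % m)}
        (pvSetV_shape hsh _ _)
        (by
          intro c
          rw [pvGetV_setV hsh hi hj, Finset.mem_singleton]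
          constructor
          · rintro (h' | h')
            · exact Or.inr h'.symm
            · exact Or.inl h'
          · rintro (h' | h')
            · exact Or.inr h'
            · exact Or.inl h'.symm)
        (by intro c hc; simpa using hc)
        (by
          intro c hc
          rw [Finset.mem_singleton] at hc
          exact hc ▸ pvReach.refl)
        (by
          intro c hc hcq
          rw [Finset.mem_singleton] at hc
          exact absurd (by simp [hc]) hcq)
        (by rw [Finset.sum_singleton])
        (by
          have hle := pvCard_le n m (fun c : Nat × Nat => pvP0 maps n m c ∧
            ¬ pvGetV st.1 c.1 c.2 = true) {(K / m, K % m)}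
          have h2 := Nat.add_le_add_right (Nat.mul_le_mul_left 5 hle) 1
          simpa [Nat.mul_assoc] using h2)
    -- every member of MA is an unvisited land cell
    have hMAP : ∀ c ∈ MA, pvP0 maps n m c ∧ ¬ pvGetV st.1 c.1 c.2 = true :=
      fun c hc => pvReach_P (hreA c hc) hPc
    -- MA is the full P0-component of the seed
    have hregA : pvRegion (pvP0 maps n m) (K / m, K % m) MA := by
      refine ⟨hsubA (Finset.mem_singleton_self _), ?_, ?_⟩
      · intro c hc
        exact pvReach_mono (fun x hx => hx.1) (hreA c hc)
      · intro c hc d hadj hPd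
        by_cases hgd : pvGetV st.1 d.1 d.2 = true
        · exfalso
          have hVd := (hchar d).1 hgd
          have hconn_dc : pvConn maps n m d c :=
            pvReach.step pvReach.refl (pvAdj_symm hadj) (hMAP c hc).1
          have hVc := pvV_conn hVd hconn_dc
          exact (hMAP c hc).2 ((hchar c).2 hVc)
        · exact hclA c hc d hadj ⟨hPd, hgd⟩
    have hMA_comp : MA = pvComp maps n m (K / m, K % m) :=
      pvRegion_unique hregA (pvRegion_comp hP0c)
    -- the seed is the minimum-index cell of its component
    have hseed : pvSeed maps n m (K / m, K % m) := by
      refine ⟨hP0c, fun d hd hconn => ?_⟩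
      rw [hidxc]
      by_contra hlt
      exact hnotV ⟨d, hd, by omega, pvReach_symm hP0c hconn⟩
    refine ⟨hshA, ?_, ?_⟩
    · intro c
      rw [hchA c]
      constructor
      · rintro (hv | hin)
        · obtain ⟨d, hd, hlt, hconn⟩ := (hchar c).1 hv
          exact ⟨d, hd, by omega, hconn⟩
        · exact ⟨(K / m, K % m), hP0c, by omega,
            (mem_pvComp hP0c c).1 (hMA_comp ▸ hin)⟩
      · rintro ⟨d, hd, hlt, hconn⟩
        rcases Nat.lt_or_ge (pvIdx m d) K with hltK | hgeK
        · exact Or.inl ((hchar c).2 ⟨d, hd, hltK, hconn⟩)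
        · have hdK : pvIdx m d = K := by omega
          have : d = (K / m, K % m) := by
            have := pvCellOf_idx hd.2.1
            rw [hdK] at this
            exact this.symm
          subst this
          exact Or.inr (hMA_comp ▸ (mem_pvComp hP0c c).2 hconn)
    · have hval : (bfsLoop (maps.map String.toList) n m (5 * n * m + 1) [(K / m, K % m)]
          (pvSetV st.1 (K / m) (K % m))
          (pvVal (pvCell (maps.map String.toList) (K / m) (K % m)))).2 =
          pvPartial maps n m (K / m, K % m) (n * m) := by
        rw [hcntA, hMA_comp, pvPartial_full]
        exact Finset.sum_congr rfl (fun e _ => by rw [pvCell_map])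
      show st.2 ++ [(bfsLoop (maps.map String.toList) n m (5 * n * m + 1) [(K / m, K % m)]
          (pvSetV st.1 (K / m) (K % m))
          (pvVal (pvCell (maps.map String.toList) (K / m) (K % m)))).2] =
        (pvSeeds maps n m (K + 1)).map (fun s => pvPartial maps n m s (n * m))
      rw [hans, hval, pvSeeds_succ_pos maps n m K (hcK ▸ hseed), List.map_append,
        List.map_singleton, hcK]
  · rw [if_neg hcond]
    -- the scanned cell is water or already visited: nothing changes
    have hnoseed : ¬ pvSeed maps n m (K / m, K % m) := by
      intro hseed
      by_cases hX : pvChar maps (K / m) (K % m) = 'X'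
      · exact hseed.1.2.2 hX
      · have hget : pvGetV st.1 (K / m) (K % m) = true := by
          rcases Bool.eq_false_or_eq_true (pvGetV st.1 (K / m) (K % m)) with h' | h'
          · exact h'
          · exact absurd ⟨h', hcc ▸ hX⟩ hcond
        obtain ⟨d, hd, hlt, hconn⟩ := (hchar ((K / m, K % m) : Nat × Nat)).1 hget
        have := hseed.2 d hd (pvReach_symm hd hconn)
        rw [hidxc] at this
        omega
    refine ⟨hsh, ?_, ?_⟩
    · intro c
      rw [hchar c]
      constructor
      · rintro ⟨d, hd, hlt, hconn⟩
        exact ⟨d, hd, by omega, hconn⟩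
      · rintro ⟨d, hd, hlt, hconn⟩
        rcases Nat.lt_or_ge (pvIdx m d) K with hltK | hgeK
        · exact ⟨d, hd, hltK, hconn⟩
        · have hdK : pvIdx m d = K := by omega
          have hdc : d = (K / m, K % m) := by
            have := pvCellOf_idx hd.2.1
            rw [hdK] at this
            exact this.symm
          rw [hdc] at hd hconn
          have hXd : pvCell (maps.map String.toList) (K / m) (K % m) ≠ 'X' := by
            rw [hcc]; exact hd.2.2
          rcases Bool.eq_false_or_eq_true (pvGetV st.1 (K / m) (K % m)) with h' | h'
          · obtain ⟨e, he, helt, heconn⟩ := (hchar ((K / m, K % m) : Nat × Nat)).1 h'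
            exact ⟨e, he, helt, pvReach_trans heconn hconn⟩
          · exact absurd ⟨h', hXd⟩ hcond
    · rw [hans, pvSeeds_succ_neg maps n m K (hcK ▸ hnoseed)]


theorem solutionA_eq (maps : List String) :
    solution maps =
      (if PySem.List.sorted ((pvSeeds maps maps.length (maps.headD "").toList.length
            (maps.length * (maps.headD "").toList.length)).map
            (fun s => pvPartial maps maps.length (maps.headD "").toList.length s
              (maps.length * (maps.headD "").toList.length)))
          (fun x : Int => x) false = [] then [-1]
       else PySem.List.sorted ((pvSeeds maps maps.length (maps.headD "").toList.length
            (maps.length * (maps.headD "").toList.length)).map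
            (fun s => pvPartial maps maps.length (maps.headD "").toList.length s
              (maps.length * (maps.headD "").toList.length)))
          (fun x : Int => x) false) := by
  have hb : maps.foldl (fun b s => b ++ [s.toList]) [] = maps.map String.toList := by
    simpa using PySem.List.foldl_append_singleton_eq_map String.toList maps []
  have hh : ((maps.map String.toList).headD []).length = (maps.headD "").toList.length := by
    cases maps <;> simp
  have hInv := foldl_range_inv
    (fun st t =>
      if pvGetV st.1 (t / (maps.headD "").toList.length) (t % (maps.headD "").toList.length)
            = false ∧
          pvCell (maps.map String.toList) (t / (maps.headD "").toList.length)
            (t % (maps.headD "").toList.length) ≠ 'X' then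
        ((bfsLoop (maps.map String.toList) maps.length (maps.headD "").toList.length
            (5 * maps.length * (maps.headD "").toList.length + 1)
            [(t / (maps.headD "").toList.length, t % (maps.headD "").toList.length)]
            (pvSetV st.1 (t / (maps.headD "").toList.length) (t % (maps.headD "").toList.length))
            (pvVal (pvCell (maps.map String.toList) (t / (maps.headD "").toList.length)
              (t % (maps.headD "").toList.length)))).1,
         st.2 ++ [(bfsLoop (maps.map String.toList) maps.length (maps.headD "").toList.length
            (5 * maps.length * (maps.headD "").toList.length + 1)
            [(t / (maps.headD "").toList.length, t % (maps.headD "").toList.length)]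
            (pvSetV st.1 (t / (maps.headD "").toList.length) (t % (maps.headD "").toList.length))
            (pvVal (pvCell (maps.map String.toList) (t / (maps.headD "").toList.length)
              (t % (maps.headD "").toList.length)))).2])
      else st)
    (pvInvA maps maps.length (maps.headD "").toList.length)
    (maps.length * (maps.headD "").toList.length)
    ((List.range maps.length).map (fun _ => List.replicate (maps.headD "").toList.length false),
      ([] : List Int))
    (by
      refine ⟨pvShape_init _ _, ?_, by simp [pvSeeds]⟩
      intro c
      rw [pvGetV_init]
      simp)
    (fun K st hK hst => pvInvA_step maps maps.length (maps.headD "").toList.length K hK st hst)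
  simp only [solution, hb, List.length_map, hh]
  rw [double_fold_eq (fun st i j =>
      if pvGetV st.1 i j = false ∧ pvCell (maps.map String.toList) i j ≠ 'X' then
        ((bfsLoop (maps.map String.toList) maps.length (maps.headD "").toList.length
            (5 * maps.length * (maps.headD "").toList.length + 1) [(i, j)]
            (pvSetV st.1 i j) (pvVal (pvCell (maps.map String.toList) i j))).1,
         st.2 ++ [(bfsLoop (maps.map String.toList) maps.length (maps.headD "").toList.length
            (5 * maps.length * (maps.headD "").toList.length + 1) [(i, j)]
            (pvSetV st.1 i j) (pvVal (pvCell (maps.map String.toList) i j))).2])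
      else st)]
  rw [hInv.2.2]


-- ---------- union-find: find terminates along a descending parent chain ----------
def pvRoot (p : List Nat) (a : Nat) : Nat := ufFind p (a + 1) a

theorem ufFind_congr {p : List Nat} (hdesc : ∀ i, p.getD i i ≤ i) :
    ∀ a f g, a < f → a < g → ufFind p f a = ufFind p g a := by
  intro a
  induction a using Nat.strong_induction_on with
  | _ a ih =>
    intro f g hf hg
    cases f with
    | zero => omega
    | succ f' =>
      cases g with
      | zero => omega
      | succ g' =>
        show (if p.getD a a ≠ a then ufFind p f' (p.getD a a) else a)
          = (if p.getD a a ≠ a then ufFind p g' (p.getD a a) else a)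
        by_cases h : p.getD a a ≠ a
        · rw [if_pos h, if_pos h]
          have hlt : p.getD a a < a := lt_of_le_of_ne (hdesc a) h
          exact ih _ hlt _ _ (by omega) (by omega)
        · rw [if_neg h, if_neg h]

theorem pvRoot_fix {p : List Nat} {a : Nat} (h : p.getD a a = a) : pvRoot p a = a := by
  unfold pvRoot ufFind
  rw [h]
  simp

theorem pvRoot_step {p : List Nat} (hdesc : ∀ i, p.getD i i ≤ i) {a : Nat}
    (h : p.getD a a ≠ a) : pvRoot p a = pvRoot p (p.getD a a) := by
  have hlt : p.getD a a < a := lt_of_le_of_ne (hdesc a) h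
  unfold pvRoot
  show (if p.getD a a ≠ a then ufFind p a (p.getD a a) else a) = _
  rw [if_pos h]
  exact ufFind_congr hdesc (p.getD a a) a (p.getD a a + 1) hlt (by omega)

theorem pvRoot_isRoot {p : List Nat} (hdesc : ∀ i, p.getD i i ≤ i) :
    ∀ a, p.getD (pvRoot p a) (pvRoot p a) = pvRoot p a := by
  intro a
  induction a using Nat.strong_induction_on with
  | _ a ih =>
    by_cases h : p.getD a a = a
    · rw [pvRoot_fix h]; exact h
    · rw [pvRoot_step hdesc h]
      exact ih _ (lt_of_le_of_ne (hdesc a) h)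

theorem pvRoot_le {p : List Nat} (hdesc : ∀ i, p.getD i i ≤ i) : ∀ a, pvRoot p a ≤ a := by
  intro a
  induction a using Nat.strong_induction_on with
  | _ a ih =>
    by_cases h : p.getD a a = a
    · rw [pvRoot_fix h]
    · rw [pvRoot_step hdesc h]
      have hlt : p.getD a a < a := lt_of_le_of_ne (hdesc a) h
      exact le_trans (ih _ hlt) (by omega)

-- ---------- connectivity on flattened indices ----------
def pvConnIdx (maps : List String) (n m : Nat) (i j : Nat) : Prop :=
  ∃ c d, pvP0 maps n m c ∧ pvP0 maps n m d ∧ i = pvIdx m c ∧ j = pvIdx m d ∧ pvConn maps n m c d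

theorem pvConnIdx_symm {maps : List String} {n m i j : Nat}
    (h : pvConnIdx maps n m i j) : pvConnIdx maps n m j i := by
  obtain ⟨c, d, hc, hd, hi, hj, hcd⟩ := h
  exact ⟨d, c, hd, hc, hj, hi, pvReach_symm hc hcd⟩

theorem pvConnIdx_trans {maps : List String} {n m i j k : Nat}
    (h1 : pvConnIdx maps n m i j) (h2 : pvConnIdx maps n m j k) : pvConnIdx maps n m i k := by
  obtain ⟨c, d, hc, hd, hi, hj, hcd⟩ := h1
  obtain ⟨c', d', hc', hd', hj', hk, hcd'⟩ := h2
  have hdc' : d = c' := pvIdx_inj hd.2.1 hc'.2.1 (by omega)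
  subst hdc'
  exact ⟨c, d', hc, hd', hi, hk, pvReach_trans hcd hcd'⟩

theorem pvConnIdx_ext {maps : List String} {n m a b a' b' : Nat}
    (h1 : a' = a ∨ pvConnIdx maps n m a a') (h2 : b' = b ∨ pvConnIdx maps n m b b')
    (hab : pvConnIdx maps n m a b) : pvConnIdx maps n m a' b' := by
  have step1 : pvConnIdx maps n m a' b := by
    rcases h1 with rfl | h1
    · exact hab
    · exact pvConnIdx_trans (pvConnIdx_symm h1) hab
  rcases h2 with rfl | h2
  · exact step1
  · exact pvConnIdx_trans step1 h2

theorem pvRoot_conn {maps : List String} {n m : Nat} {p : List Nat}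
    (hdesc : ∀ i, p.getD i i ≤ i)
    (hcn : ∀ i, p.getD i i = i ∨ pvConnIdx maps n m i (p.getD i i)) :
    ∀ a, pvRoot p a = a ∨ pvConnIdx maps n m a (pvRoot p a) := by
  intro a
  induction a using Nat.strong_induction_on with
  | _ a ih =>
    by_cases h : p.getD a a = a
    · exact Or.inl (pvRoot_fix h)
    · rcases hcn a with h' | h'
      · exact absurd h' h
      · rw [pvRoot_step hdesc h]
        have hlt : p.getD a a < a := lt_of_le_of_ne (hdesc a) h
        rcases ih _ hlt with h'' | h''
        · rw [h'']
          exact Or.inr h'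
        · exact Or.inr (pvConnIdx_trans h' h'')

-- ---------- effect of one union on roots ----------
theorem pvGetD_set_self {p : List Nat} {r1 r2 : Nat} (hlen : r2 < p.length) :
    (p.set r2 r1).getD r2 r2 = r1 := by
  rw [List.getD_eq_getElem?_getD, List.getElem?_set, if_pos rfl, if_pos hlen]
  rfl

theorem pvGetD_set_other {p : List Nat} {r1 r2 i : Nat} (h : r2 ≠ i) :
    (p.set r2 r1).getD i i = p.getD i i := by
  rw [List.getD_eq_getElem?_getD, List.getElem?_set, if_neg h, ← List.getD_eq_getElem?_getD]

theorem pvDesc_set {p : List Nat} {r1 r2 : Nat} (hdesc : ∀ i, p.getD i i ≤ i) (hlt : r1 ≤ r2) :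
    ∀ i, (p.set r2 r1).getD i i ≤ i := by
  intro i
  by_cases h : r2 = i
  · subst h
    by_cases hl : r2 < p.length
    · rw [pvGetD_set_self hl]; omega
    · rw [List.set_eq_of_length_le (by omega)]
      exact hdesc r2
  · rw [pvGetD_set_other h]
    exact hdesc i

theorem pvRoot_set {p : List Nat} {r1 r2 : Nat} (hdesc : ∀ i, p.getD i i ≤ i)
    (hlen : r2 < p.length) (hr1 : p.getD r1 r1 = r1) (hr2 : p.getD r2 r2 = r2)
    (hlt : r1 < r2) :
    ∀ x, pvRoot (p.set r2 r1) x = if pvRoot p x = r2 then r1 else pvRoot p x := by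
  have hdesc' : ∀ i, (p.set r2 r1).getD i i ≤ i := pvDesc_set hdesc (by omega)
  intro x
  induction x using Nat.strong_induction_on with
  | _ x ih =>
    by_cases hx2 : x = r2
    · have hpx : (p.set r2 r1).getD x x = r1 := by rw [hx2]; exact pvGetD_set_self hlen
      rw [pvRoot_step hdesc' (by rw [hpx]; omega), hpx]
      have h1 : (p.set r2 r1).getD r1 r1 = r1 := by
        rw [pvGetD_set_other (by omega)]; exact hr1
      rw [pvRoot_fix h1, hx2, pvRoot_fix hr2, if_pos rfl]
    · have hpx : (p.set r2 r1).getD x x = p.getD x x := pvGetD_set_other (fun h => hx2 h.symm)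
      by_cases hfix : p.getD x x = x
      · rw [pvRoot_fix (by rw [hpx]; exact hfix), pvRoot_fix hfix, if_neg hx2]
      · have hlt' : p.getD x x < x := lt_of_le_of_ne (hdesc x) hfix
        rw [pvRoot_step hdesc' (by rw [hpx]; exact hfix), hpx, ih _ hlt',
          pvRoot_step hdesc hfix]



-- ---------- one union call ----------
theorem ufUnion_spec (maps : List String) (n m : Nat) {p : List Nat} (a b : Nat)
    (hlen : p.length = n * m) (hdesc : ∀ i, p.getD i i ≤ i)
    (hcn : ∀ i, p.getD i i = i ∨ pvConnIdx maps n m i (p.getD i i))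
    (hab : pvConnIdx maps n m a b) (hb : b < n * m) (ha : a < n * m) :
    (ufUnion p a b).length = n * m ∧
    (∀ i, (ufUnion p a b).getD i i ≤ i) ∧
    (∀ i, (ufUnion p a b).getD i i = i ∨ pvConnIdx maps n m i ((ufUnion p a b).getD i i)) ∧
    (∀ x y, pvRoot p x = pvRoot p y → pvRoot (ufUnion p a b) x = pvRoot (ufUnion p a b) y) ∧
    pvRoot (ufUnion p a b) a = pvRoot (ufUnion p a b) b := by
  have hdef : ufUnion p a b = if pvRoot p a ≠ pvRoot p b then
      (if pvRoot p a < pvRoot p b then p.set (pvRoot p b) (pvRoot p a)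
       else p.set (pvRoot p a) (pvRoot p b)) else p := rfl
  have hra : p.getD (pvRoot p a) (pvRoot p a) = pvRoot p a := pvRoot_isRoot hdesc a
  have hrb : p.getD (pvRoot p b) (pvRoot p b) = pvRoot p b := pvRoot_isRoot hdesc b
  have hconn_a : pvRoot p a = a ∨ pvConnIdx maps n m a (pvRoot p a) := pvRoot_conn hdesc hcn a
  have hconn_b : pvRoot p b = b ∨ pvConnIdx maps n m b (pvRoot p b) := pvRoot_conn hdesc hcn b
  by_cases hne : pvRoot p a ≠ pvRoot p b
  · by_cases hord : pvRoot p a < pvRoot p b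
    · have hp' : ufUnion p a b = p.set (pvRoot p b) (pvRoot p a) := by
        rw [hdef, if_pos hne, if_pos hord]
      have hblen : pvRoot p b < p.length := by
        have := pvRoot_le hdesc b
        omega
      have heff := pvRoot_set hdesc hblen hra hrb hord
      have hdesc' := pvDesc_set (r1 := pvRoot p a) (r2 := pvRoot p b) hdesc (by omega)
      rw [hp']
      refine ⟨by rw [List.length_set]; exact hlen, hdesc', ?_, ?_, ?_⟩
      · intro i
        by_cases hi : pvRoot p b = i
        · subst hi
          rw [pvGetD_set_self hblen]
          exact Or.inr (pvConnIdx_ext hconn_b hconn_a (pvConnIdx_symm hab))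
        · rw [pvGetD_set_other hi]
          exact hcn i
      · intro x y h
        rw [heff x, heff y, h]
      · rw [heff a, heff b, if_neg hne, if_pos rfl]
    · have hord' : pvRoot p b < pvRoot p a := by omega
      have hp' : ufUnion p a b = p.set (pvRoot p a) (pvRoot p b) := by
        rw [hdef, if_pos hne, if_neg hord]
      have halen : pvRoot p a < p.length := by
        have := pvRoot_le hdesc a
        omega
      have heff := pvRoot_set hdesc halen hrb hra hord'
      have hdesc' := pvDesc_set (r1 := pvRoot p b) (r2 := pvRoot p a) hdesc (by omega)
      rw [hp']
      refine ⟨by rw [List.length_set]; exact hlen, hdesc', ?_, ?_, ?_⟩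
      · intro i
        by_cases hi : pvRoot p a = i
        · subst hi
          rw [pvGetD_set_self halen]
          exact Or.inr (pvConnIdx_ext hconn_a hconn_b hab)
        · rw [pvGetD_set_other hi]
          exact hcn i
      · intro x y h
        rw [heff x, heff y, h]
      · rw [heff a, heff b, if_pos rfl, if_neg (fun h => hne h.symm)]
  · rw [hdef, if_neg hne]
    exact ⟨hlen, hdesc, hcn, fun x y h => h, not_ne_iff.mp hne⟩


-- ---------- pass 1: the union loop's invariant ----------
def pvEdge (maps : List String) (n m K a b : Nat) : Prop :=
  a < K ∧ pvP0 maps n m (pvCellOf m a) ∧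
    ((b = a + m ∧ pvP0 maps n m ((pvCellOf m a).1 + 1, (pvCellOf m a).2)) ∨
     (b = a + 1 ∧ pvP0 maps n m ((pvCellOf m a).1, (pvCellOf m a).2 + 1)))

def pvInvUF (maps : List String) (n m K : Nat) (p : List Nat) : Prop :=
  p.length = n * m ∧ (∀ i, p.getD i i ≤ i) ∧
  (∀ i, p.getD i i = i ∨ pvConnIdx maps n m i (p.getD i i)) ∧
  (∀ a b, pvEdge maps n m K a b → pvRoot p a = pvRoot p b)

theorem pvGetD_range (N i : Nat) : (List.range N).getD i i = i := by
  rw [List.getD_eq_getElem?_getD]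
  rcases Nat.lt_or_ge i N with h | h
  · rw [List.getElem?_range h]
    rfl
  · rw [List.getElem?_eq_none (by simpa)]
    rfl

theorem pvInvUF_init (maps : List String) (n m : Nat) :
    pvInvUF maps n m 0 (List.range (n * m)) := by
  refine ⟨List.length_range, fun i => le_of_eq (pvGetD_range _ i),
    fun i => Or.inl (pvGetD_range _ i), fun a b he => ?_⟩
  exact absurd he.1 (Nat.not_lt_zero a)

set_option maxHeartbeats 1000000 in
theorem pvInvUF_step (maps : List String) (n m K : Nat) (hK : K < n * m) (p : List Nat)
    (h : pvInvUF maps n m K p) :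
    pvInvUF maps n m (K + 1)
      (if pvChar maps (K / m) (K % m) ≠ 'X' then
        let p1 := if K / m + 1 < n ∧ pvChar maps (K / m + 1) (K % m) ≠ 'X' then
          ufUnion p K (K + m) else p
        if K % m + 1 < m ∧ pvChar maps (K / m) (K % m + 1) ≠ 'X' then
          ufUnion p1 K (K + 1) else p1
      else p) := by
  obtain ⟨hlen, hdesc, hcn, hedge⟩ := h
  have hm : 0 < m := by
    by_contra hm0
    have : m = 0 := by omega
    subst this
    simp at hK
  have hrange := pvCellOf_lt (n := n) (m := m) hK
  have hi : K / m < n := hrange.1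
  have hj : K % m < m := hrange.2
  have hcK : pvCellOf m K = (K / m, K % m) := rfl
  have hidxc : pvIdx m (K / m, K % m) = K := by rw [← hcK, pvIdx_cellOf hm]
  have hidxd : pvIdx m (K / m + 1, K % m) = K + m := by
    unfold pvIdx at hidxc ⊢
    simp only at hidxc ⊢
    rw [Nat.succ_mul]
    omega
  have hidxr : pvIdx m (K / m, K % m + 1) = K + 1 := by
    unfold pvIdx at hidxc ⊢
    simp only at hidxc ⊢
    omega
  by_cases hX : pvChar maps (K / m) (K % m) ≠ 'X'
  · rw [if_pos hX]
    have hP0c : pvP0 maps n m (K / m, K % m) := ⟨hi, hj, hX⟩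
    -- first (down) union
    by_cases hc1 : K / m + 1 < n ∧ pvChar maps (K / m + 1) (K % m) ≠ 'X'
    · by_cases hc2 : K % m + 1 < m ∧ pvChar maps (K / m) (K % m + 1) ≠ 'X'
      ·
        have hP0d : pvP0 maps n m (K / m + 1, K % m) := ⟨hc1.1, hj, hc1.2⟩
        have hP0r : pvP0 maps n m (K / m, K % m + 1) := ⟨hi, hc2.1, hc2.2⟩
        have hconn_d : pvConnIdx maps n m K (K + m) :=
          ⟨(K / m, K % m), (K / m + 1, K % m), hP0c, hP0d, hidxc.symm, hidxd.symm,
            pvReach.step pvReach.refl (Or.inr ⟨rfl, Or.inr rfl⟩) hP0d⟩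
        have hconn_r : pvConnIdx maps n m K (K + 1) :=
          ⟨(K / m, K % m), (K / m, K % m + 1), hP0c, hP0r, hidxc.symm, hidxr.symm,
            pvReach.step pvReach.refl (Or.inl ⟨rfl, Or.inr rfl⟩) hP0r⟩
        obtain ⟨hlen1, hdesc1, hcn1, hmono1, hroot1⟩ :=
          ufUnion_spec maps n m K (K + m) hlen hdesc hcn hconn_d
            (hidxd ▸ pvIdx_lt hc1.1 hj) hK
        obtain ⟨hlen2, hdesc2, hcn2, hmono2, hroot2⟩ :=
          ufUnion_spec maps n m K (K + 1) hlen1 hdesc1 hcn1 hconn_r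
            (hidxr ▸ pvIdx_lt hi hc2.1) hK
        rw [if_pos hc1, if_pos hc2]
        refine ⟨hlen2, hdesc2, hcn2, fun a b he => ?_⟩
        rcases Nat.lt_or_ge a K with haK | haK
        · exact hmono2 _ _ (hmono1 _ _ (hedge a b ⟨haK, he.2.1, he.2.2⟩))
        · have haK' : a = K := by have := he.1; omega
          subst haK'
          rcases he.2.2 with ⟨rfl, _⟩ | ⟨rfl, _⟩
          · exact hmono2 _ _ hroot1
          · exact hroot2
      ·
        have hP0d : pvP0 maps n m (K / m + 1, K % m) := ⟨hc1.1, hj, hc1.2⟩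
        have hconn_d : pvConnIdx maps n m K (K + m) :=
          ⟨(K / m, K % m), (K / m + 1, K % m), hP0c, hP0d, hidxc.symm, hidxd.symm,
            pvReach.step pvReach.refl (Or.inr ⟨rfl, Or.inr rfl⟩) hP0d⟩
        obtain ⟨hlen1, hdesc1, hcn1, hmono1, hroot1⟩ :=
          ufUnion_spec maps n m K (K + m) hlen hdesc hcn hconn_d
            (hidxd ▸ pvIdx_lt hc1.1 hj) hK
        rw [if_pos hc1, if_neg hc2]
        refine ⟨hlen1, hdesc1, hcn1, fun a b he => ?_⟩
        rcases Nat.lt_or_ge a K with haK | haK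
        · exact hmono1 _ _ (hedge a b ⟨haK, he.2.1, he.2.2⟩)
        · have haK' : a = K := by have := he.1; omega
          subst haK'
          rcases he.2.2 with ⟨rfl, _⟩ | ⟨rfl, hP0r⟩
          · exact hroot1
          · exact absurd ⟨hP0r.2.1, hP0r.2.2⟩ hc2
    · by_cases hc2 : K % m + 1 < m ∧ pvChar maps (K / m) (K % m + 1) ≠ 'X'
      ·
        have hP0r : pvP0 maps n m (K / m, K % m + 1) := ⟨hi, hc2.1, hc2.2⟩
        have hconn_r : pvConnIdx maps n m K (K + 1) :=
          ⟨(K / m, K % m), (K / m, K % m + 1), hP0c, hP0r, hidxc.symm, hidxr.symm,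
            pvReach.step pvReach.refl (Or.inl ⟨rfl, Or.inr rfl⟩) hP0r⟩
        obtain ⟨hlen2, hdesc2, hcn2, hmono2, hroot2⟩ :=
          ufUnion_spec maps n m K (K + 1) hlen hdesc hcn hconn_r
            (hidxr ▸ pvIdx_lt hi hc2.1) hK
        rw [if_neg hc1, if_pos hc2]
        refine ⟨hlen2, hdesc2, hcn2, fun a b he => ?_⟩
        rcases Nat.lt_or_ge a K with haK | haK
        · exact hmono2 _ _ (hedge a b ⟨haK, he.2.1, he.2.2⟩)
        · have haK' : a = K := by have := he.1; omega
          subst haK'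
          rcases he.2.2 with ⟨rfl, hP0d⟩ | ⟨rfl, _⟩
          · exact absurd ⟨hP0d.1, hP0d.2.2⟩ hc1
          · exact hroot2
      ·
        rw [if_neg hc1, if_neg hc2]
        refine ⟨hlen, hdesc, hcn, fun a b he => ?_⟩
        rcases Nat.lt_or_ge a K with haK | haK
        · exact hedge a b ⟨haK, he.2.1, he.2.2⟩
        · have haK' : a = K := by have := he.1; omega
          subst haK'
          rcases he.2.2 with ⟨rfl, hP0d⟩ | ⟨rfl, hP0r⟩
          · exact absurd ⟨hP0d.1, hP0d.2.2⟩ hc1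
          · exact absurd ⟨hP0r.2.1, hP0r.2.2⟩ hc2
  · rw [if_neg hX]
    refine ⟨hlen, hdesc, hcn, fun a b he => ?_⟩
    rcases Nat.lt_or_ge a K with haK | haK
    · exact hedge a b ⟨haK, he.2.1, he.2.2⟩
    · have haK' : a = K := by have := he.1; omega
      subst haK'
      exact absurd (not_ne_iff.mp hX) he.2.1.2.2


-- ---------- after pass 1, roots are the seeds' indices ----------
theorem pvRoot_conn_eq (maps : List String) (n m : Nat) {p : List Nat}
    (h : pvInvUF maps n m (n * m) p) {s : Nat × Nat} (hs : pvP0 maps n m s) :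
    ∀ c, pvConn maps n m s c → pvRoot p (pvIdx m s) = pvRoot p (pvIdx m c) := by
  intro c hc
  induction hc with
  | refl => rfl
  | @step c d hsc hadj hPd ih =>
    rw [ih]
    have hPc : pvP0 maps n m c := pvReach_P hsc hs
    rcases hadj with ⟨h1, h2 | h2⟩ | ⟨h1, h2 | h2⟩
    · -- c is directly right of d : edge (idx d, idx d + 1)
      have hca : pvCellOf m (pvIdx m d) = d := pvCellOf_idx hPd.2.1
      have hbe : pvIdx m c = pvIdx m d + 1 := by
        unfold pvIdx
        rw [h1]
        omega
      have hrc : ((pvCellOf m (pvIdx m d)).1, (pvCellOf m (pvIdx m d)).2 + 1) = c := by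
        rw [hca]
        exact Prod.ext_iff.2 ⟨h1.symm, by omega⟩
      exact (h.2.2.2 (pvIdx m d) (pvIdx m c)
        ⟨pvIdx_lt hPd.1 hPd.2.1, hca.symm ▸ hPd, Or.inr ⟨hbe, hrc ▸ hPc⟩⟩).symm
    · -- d is directly right of c : edge (idx c, idx c + 1)
      have hca : pvCellOf m (pvIdx m c) = c := pvCellOf_idx hPc.2.1
      have hbe : pvIdx m d = pvIdx m c + 1 := by
        unfold pvIdx
        rw [h1]
        omega
      have hrc : ((pvCellOf m (pvIdx m c)).1, (pvCellOf m (pvIdx m c)).2 + 1) = d := by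
        rw [hca]
        exact Prod.ext_iff.2 ⟨h1, by omega⟩
      exact h.2.2.2 (pvIdx m c) (pvIdx m d)
        ⟨pvIdx_lt hPc.1 hPc.2.1, hca.symm ▸ hPc, Or.inr ⟨hbe, hrc ▸ hPd⟩⟩
    · -- c is directly below d : edge (idx d, idx d + m)
      have hca : pvCellOf m (pvIdx m d) = d := pvCellOf_idx hPd.2.1
      have hbe : pvIdx m c = pvIdx m d + m := by
        unfold pvIdx
        rw [h2, Nat.succ_mul, h1]
        omega
      have hrc : ((pvCellOf m (pvIdx m d)).1 + 1, (pvCellOf m (pvIdx m d)).2) = c := by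
        rw [hca]
        exact Prod.ext_iff.2 ⟨by omega, h1.symm⟩
      exact (h.2.2.2 (pvIdx m d) (pvIdx m c)
        ⟨pvIdx_lt hPd.1 hPd.2.1, hca.symm ▸ hPd, Or.inl ⟨hbe, hrc ▸ hPc⟩⟩).symm
    · -- d is directly below c : edge (idx c, idx c + m)
      have hca : pvCellOf m (pvIdx m c) = c := pvCellOf_idx hPc.2.1
      have hbe : pvIdx m d = pvIdx m c + m := by
        unfold pvIdx
        rw [h2, Nat.succ_mul, h1]
        omega
      have hrc : ((pvCellOf m (pvIdx m c)).1 + 1, (pvCellOf m (pvIdx m c)).2) = d := by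
        rw [hca]
        exact Prod.ext_iff.2 ⟨by omega, h1⟩
      exact h.2.2.2 (pvIdx m c) (pvIdx m d)
        ⟨pvIdx_lt hPc.1 hPc.2.1, hca.symm ▸ hPc, Or.inl ⟨hbe, hrc ▸ hPd⟩⟩

theorem pvRoot_final (maps : List String) (n m : Nat) {p : List Nat}
    (h : pvInvUF maps n m (n * m) p) {s c : Nat × Nat}
    (hseed : pvSeed maps n m s) (hconn : pvConn maps n m s c) :
    pvRoot p (pvIdx m c) = pvIdx m s := by
  have h1 : pvRoot p (pvIdx m s) = pvRoot p (pvIdx m c) :=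
    pvRoot_conn_eq maps n m h hseed.1 c hconn
  have h2 : pvRoot p (pvIdx m s) = pvIdx m s := by
    rcases pvRoot_conn h.2.1 h.2.2.1 (pvIdx m s) with he | hci
    · exact he
    · obtain ⟨c', d', hc', hd', hidx1, hidx2, hcd⟩ := hci
      have hc's : c' = s := pvIdx_inj hc'.2.1 hseed.1.2.1 hidx1.symm
      subst hc's
      have hle1 : pvIdx m c' ≤ pvIdx m d' := hseed.2 d' hd' hcd
      have hle2 : pvRoot p (pvIdx m c') ≤ pvIdx m c' := pvRoot_le h.2.1 _
      omega
  rw [← h1, h2]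


-- ---------- partial component sums ----------
theorem pvPartial_succ_not_mem {maps : List String} {n m K : Nat} {s : Nat × Nat}
    (hc : ∀ e ∈ pvComp maps n m s, pvIdx m e ≠ K) :
    pvPartial maps n m s (K + 1) = pvPartial maps n m s K := by
  unfold pvPartial
  congr 1
  apply Finset.filter_congr
  intro e he
  have := hc e he
  constructor <;> intro h' <;> simp at h' ⊢ <;> omega

theorem pvPartial_succ_mem {maps : List String} {n m K : Nat} {s c : Nat × Nat}
    (hcm : c ∈ pvComp maps n m s) (hcK : pvIdx m c = K) :
    pvPartial maps n m s (K + 1) = pvPartial maps n m s K + pvVal (pvChar maps c.1 c.2) := by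
  unfold pvPartial
  have hnotin : c ∉ (pvComp maps n m s).filter (fun e => pvIdx m e < K) := by
    intro h'
    rw [Finset.mem_filter] at h'
    omega
  have hset : (pvComp maps n m s).filter (fun e => pvIdx m e < K + 1) =
      insert c ((pvComp maps n m s).filter (fun e => pvIdx m e < K)) := by
    apply Finset.ext
    intro e
    rw [Finset.mem_insert, Finset.mem_filter, Finset.mem_filter]
    constructor
    · rintro ⟨he, hlt⟩
      rcases Nat.lt_or_ge (pvIdx m e) K with h' | h'
      · exact Or.inr ⟨he, h'⟩
      · have heK : pvIdx m e = K := by omega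
        have h2m : e.2 < m := (pvComp_range he).2
        have h2m' : c.2 < m := (pvComp_range hcm).2
        exact Or.inl (pvIdx_inj h2m h2m' (by omega))
    · rintro (rfl | ⟨he, hlt⟩)
      · exact ⟨hcm, by omega⟩
      · exact ⟨he, by omega⟩
  rw [hset, Finset.sum_insert hnotin]
  ring

-- ---------- pass 2: the dict-building loop's invariant ----------
set_option maxHeartbeats 1000000 in
theorem pvInvB_step (maps : List String) (n m K : Nat) (hK : K < n * m) (p : List Nat)
    (hUF : pvInvUF maps n m (n * m) p) (d : PySem.Dict Nat Int)
    (h : d.items = (pvSeeds maps n m K).map (fun s => (pvIdx m s, pvPartial maps n m s K))) :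
    (if pvChar maps (K / m) (K % m) ≠ 'X' then
        d.insert (ufFind p (K + 1) K)
          (d.getD (ufFind p (K + 1) K) 0 + pvVal (pvChar maps (K / m) (K % m)))
      else d).items =
      (pvSeeds maps n m (K + 1)).map (fun s => (pvIdx m s, pvPartial maps n m s (K + 1))) := by
  have hm : 0 < m := by
    by_contra hm0
    have : m = 0 := by omega
    subst this
    simp at hK
  have hrange := pvCellOf_lt (n := n) (m := m) hK
  have hi : K / m < n := hrange.1
  have hj : K % m < m := hrange.2
  have hcK : pvCellOf m K = (K / m, K % m) := rfl
  have hidxc : pvIdx m (K / m, K % m) = K := by rw [← hcK, pvIdx_cellOf hm]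
  have hkeys : d.keys = (pvSeeds maps n m K).map (fun s => pvIdx m s) := by
    simp only [PySem.Dict.keys, h, List.map_map]
    rfl
  have hnodup : d.keys.Nodup := by
    rw [hkeys]
    exact pvSeeds_idx_nodup hm K
  by_cases hX : pvChar maps (K / m) (K % m) ≠ 'X'
  · rw [if_pos hX]
    have hP0c : pvP0 maps n m (K / m, K % m) := ⟨hi, hj, hX⟩
    have hfr : ufFind p (K + 1) K = pvRoot p K := rfl
    by_cases hcseed : pvSeed maps n m ((K / m, K % m) : Nat × Nat)
    · -- the scanned land cell is the first of a new component: a fresh dict key appears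
      have hr : pvRoot p K = K := by
        have := pvRoot_final maps n m hUF hcseed (pvReach.refl (P := pvP0 maps n m))
        rwa [hidxc] at this
      have hct : d.contains K = false := by
        rcases Bool.eq_false_or_eq_true (d.contains K) with h' | h'
        · exfalso
          have hmemk := (PySem.Dict.contains_iff_mem_keys d K).1 h'
          rw [hkeys] at hmemk
          obtain ⟨s', hs', hs'K⟩ := List.mem_map.1 hmemk
          have := pvSeeds_idx_lt hm hs'
          omega
        · exact h'
      rw [hfr, hr, PySem.Dict.items_insert_of_not_contains d _ hct,
        PySem.Dict.getD_of_not_contains d _ hct, h,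
        pvSeeds_succ_pos maps n m K (hcK ▸ hcseed), List.map_append, List.map_singleton, hcK]
      congr 1
      · -- older components do not contain the scanned cell
        apply List.map_congr_left
        intro s' hs'
        have hseed' : pvSeed maps n m s' := ((mem_pvSeeds_iff hm).1 hs').1
        have hlt' : pvIdx m s' < K := ((mem_pvSeeds_iff hm).1 hs').2
        have hnot : ∀ e ∈ pvComp maps n m s', pvIdx m e ≠ K := by
          intro e he heK
          have h2m : e.2 < m := (pvComp_range he).2
          have hec : e = (K / m, K % m) := by
            have := pvCellOf_idx h2m
            rw [heK] at this
            exact this.symm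
          have hconn : pvConn maps n m s' e := (mem_pvComp hseed'.1 e).1 he
          rw [hec] at hconn
          have := pvSeed_unique hseed' hcseed hconn
          rw [this, hidxc] at hlt'
          omega
        rw [pvPartial_succ_not_mem hnot]
      · -- the new component's partial sum so far is just the scanned cell's value
        have hsingle : (pvComp maps n m (K / m, K % m)).filter
            (fun e => pvIdx m e < K + 1) = {((K / m, K % m) : Nat × Nat)} := by
          apply Finset.ext
          intro e
          rw [Finset.mem_filter, Finset.mem_singleton]
          constructor
          · rintro ⟨he, hlt⟩
            have hconn : pvConn maps n m (K / m, K % m) e :=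
              (mem_pvComp hP0c e).1 he
            have hge := hcseed.2 e (pvReach_P hconn hP0c) hconn
            rw [hidxc] at hge
            have h2m : e.2 < m := (pvComp_range he).2
            have heK : pvIdx m e = K := by omega
            have := pvCellOf_idx h2m
            rw [heK] at this
            exact this.symm
          · rintro rfl
            exact ⟨(mem_pvComp hP0c _).2 (pvReach.refl), by omega⟩
        have : pvPartial maps n m (K / m, K % m) (K + 1) =
            pvVal (pvChar maps (K / m) (K % m)) := by
          unfold pvPartial
          rw [hsingle, Finset.sum_singleton]
        rw [this, hidxc]
        simp
    · -- the scanned land cell joins an already-seen component: its seed's entry is updated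
      obtain ⟨s, hseed, hconn⟩ := pvSeed_exists hP0c
      have hr : pvRoot p K = pvIdx m s := by
        have := pvRoot_final maps n m hUF hseed hconn
        rwa [hidxc] at this
      have hsc : s ≠ ((K / m, K % m) : Nat × Nat) := by
        intro h'
        rw [h'] at hseed
        exact hcseed hseed
      have hslt : pvIdx m s < K := by
        have hle := hseed.2 (K / m, K % m) hP0c hconn
        rw [hidxc] at hle
        have : pvIdx m s ≠ K := by
          intro h'
          exact hsc (pvIdx_inj hseed.1.2.1 hj (h'.trans hidxc.symm))
        omega
      have hsmem : s ∈ pvSeeds maps n m K := (mem_pvSeeds_iff hm).2 ⟨hseed, hslt⟩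
      have hitem : ((pvIdx m s, pvPartial maps n m s K) : Nat × Int) ∈ d.items := by
        rw [h]
        exact List.mem_map.2 ⟨s, hsmem, rfl⟩
      have hct : d.contains (pvIdx m s) = true := by
        rw [PySem.Dict.contains_iff_mem_keys d, hkeys]
        exact List.mem_map.2 ⟨s, hsmem, rfl⟩
      rw [hfr, hr, PySem.Dict.items_insert_of_contains d _ hct,
        PySem.Dict.getD_of_mem_items d hitem hnodup _, h,
        pvSeeds_succ_neg maps n m K (hcK ▸ hcseed), List.map_map]
      apply List.map_congr_left
      intro s' hs'
      have hseed' : pvSeed maps n m s' := ((mem_pvSeeds_iff hm).1 hs').1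
      simp only [Function.comp]
      by_cases hss' : s' = s
      · subst hss'
        rw [if_pos (by simp)]
        have hcm : ((K / m, K % m) : Nat × Nat) ∈ pvComp maps n m s' :=
          (mem_pvComp hseed'.1 _).2 hconn
        rw [pvPartial_succ_mem hcm hidxc]
      · rw [if_neg (by
          simp only [beq_iff_eq]
          intro h'
          exact hss' (pvIdx_inj hseed'.1.2.1 hseed.1.2.1 h'))]
        have hnot : ∀ e ∈ pvComp maps n m s', pvIdx m e ≠ K := by
          intro e he heK
          have h2m : e.2 < m := (pvComp_range he).2
          have hec : e = (K / m, K % m) := by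
            have := pvCellOf_idx h2m
            rw [heK] at this
            exact this.symm
          have hconn' : pvConn maps n m s' e := (mem_pvComp hseed'.1 e).1 he
          rw [hec] at hconn'
          have hconn'' : pvConn maps n m s' s :=
            pvReach_trans hconn' (pvReach_symm hseed.1 hconn)
          exact hss' (pvSeed_unique hseed' hseed hconn'')
        rw [pvPartial_succ_not_mem hnot]
  · rw [if_neg hX]
    have hX' : pvChar maps (K / m) (K % m) = 'X' := not_ne_iff.mp hX
    have hnoseed : ¬ pvSeed maps n m ((K / m, K % m) : Nat × Nat) :=
      fun hs => hs.1.2.2 hX'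
    rw [h, pvSeeds_succ_neg maps n m K (hcK ▸ hnoseed)]
    apply List.map_congr_left
    intro s' hs'
    have hseed' : pvSeed maps n m s' := ((mem_pvSeeds_iff hm).1 hs').1
    have hnot : ∀ e ∈ pvComp maps n m s', pvIdx m e ≠ K := by
      intro e he heK
      have h2m : e.2 < m := (pvComp_range he).2
      have hec : e = (K / m, K % m) := by
        have := pvCellOf_idx h2m
        rw [heK] at this
        exact this.symm
      have hP0e : pvP0 maps n m e := pvReach_P ((mem_pvComp hseed'.1 e).1 he) hseed'.1
      rw [hec] at hP0e
      exact hP0e.2.2 hX'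
    rw [pvPartial_succ_not_mem hnot]


theorem solutionB_eq (maps : List String) :
    solution_alt maps =
      (if PySem.List.sorted ((pvSeeds maps maps.length (maps.headD "").toList.length
            (maps.length * (maps.headD "").toList.length)).map
            (fun s => pvPartial maps maps.length (maps.headD "").toList.length s
              (maps.length * (maps.headD "").toList.length)))
          (fun x : Int => x) false = [] then [-1]
       else PySem.List.sorted ((pvSeeds maps maps.length (maps.headD "").toList.length
            (maps.length * (maps.headD "").toList.length)).map
            (fun s => pvPartial maps maps.length (maps.headD "").toList.length s
              (maps.length * (maps.headD "").toList.length)))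
          (fun x : Int => x) false) := by
  simp only [solution_alt]
  set n := maps.length with hn
  set m := (maps.headD "").toList.length with hm
  set parent := (List.range (n * m)).foldl (fun p idx =>
    if pvChar maps (idx / m) (idx % m) ≠ 'X' then
      let p1 := if idx / m + 1 < n ∧ pvChar maps (idx / m + 1) (idx % m) ≠ 'X' then
        ufUnion p idx (idx + m) else p
      if idx % m + 1 < m ∧ pvChar maps (idx / m) (idx % m + 1) ≠ 'X' then
        ufUnion p1 idx (idx + 1) else p1
    else p) (List.range (n * m)) with hparent
  have hUF : pvInvUF maps n m (n * m) parent := by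
    rw [hparent]
    exact foldl_range_inv _ (pvInvUF maps n m) (n * m) (List.range (n * m))
      (pvInvUF_init maps n m)
      (fun K st hK hst => pvInvUF_step maps n m K hK st hst)
  set sums := (List.range (n * m)).foldl (fun (d : PySem.Dict Nat Int) idx =>
    if pvChar maps (idx / m) (idx % m) ≠ 'X' then
      d.insert (ufFind parent (idx + 1) idx)
        (d.getD (ufFind parent (idx + 1) idx) 0 + pvVal (pvChar maps (idx / m) (idx % m)))
    else d) PySem.Dict.empty with hsums
  have hitems : sums.items = (pvSeeds maps n m (n * m)).map
      (fun s => (pvIdx m s, pvPartial maps n m s (n * m))) := by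
    rw [hsums]
    exact foldl_range_inv _
      (fun K d => d.items = (pvSeeds maps n m K).map
        (fun s => (pvIdx m s, pvPartial maps n m s K)))
      (n * m) PySem.Dict.empty rfl
      (fun K st hK hst => pvInvB_step maps n m K hK parent hUF st hst)
  have hvals : sums.values = (pvSeeds maps n m (n * m)).map
      (fun s => pvPartial maps n m s (n * m)) := by
    simp only [PySem.Dict.values, hitems, List.map_map]
    rfl
  rw [hvals]

theorem ports_eq (maps : List String) : solution maps = solution_alt maps := by
  rw [solutionA_eq, solutionB_eq]

-- ===== VERDICT (by name: the statement is the Claim_ definition above) =====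
theorem solution_spec : Claim_equal_solution := by
  intro maps _ _
  exact ports_eq maps
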